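-- pv_equiv track=rewrite | github.com/haraldfw/k-type-visuals-prg-tools | generate.py | build_overlay_ring_anim
-- ===== SOURCE A (Python) =====
-- col_black = (0, 0, 0)
--
-- def set_pixel(frame, index, col):
--     if index < 0:
--         index = len(frame) - index
--     elif index >= len(frame):
--         index -= len(frame)
--     frame[index] = col
--
-- def build_ring_anim(col_static, col_moving_spot, shift):
--     start = 88
--     end = 120
--     length = end - start
--     frame = [col_static] * length
--     frames = []
--     for i in range(length):
--         i += shift
--         set_pixel(frame, i, col_moving_spot)
--         frames.append(list(frame))
--         set_pixel(frame, i, col_static)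
--     return frames
--
-- def build_overlay_ring_anim(col_static=col_black, anim_definitions=[(0, (255, 255, 0))]):
--     animations = []
--
--     for i, col in anim_definitions:
--         animations.append(build_ring_anim(col_static, col, i))
--
--     animation = build_ring_anim(col_static, anim_definitions[0][1], anim_definitions[0][0])
--     anim_definitions.pop(0)
--     for anim_index, overlay_anim in enumerate(animations):
--         for frame_index, overlay_frame in enumerate(overlay_anim):
--             for col_index, overlay_col in enumerate(overlay_frame):
--                 original_col = animation[frame_index][col_index]
--                 if original_col == col_static:
--                     animation[frame_index][col_index] = overlay_col
--
--     return animation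
-- ===== SOURCE B (Python) =====
-- col_black = (0, 0, 0)
--
--
-- def build_overlay_ring_anim(col_static=col_black, anim_definitions=[(0, (255, 255, 0))]):
--     # One pass per frame: paint each definition's spot onto a fresh static frame,
--     # first definition wins (a pixel is only written while it is still static).
--     # Keeps A's observable side effect: anim_definitions.pop(0).
--     length = 32
--     frames = []
--     for frame_index in range(length):
--         frame = [col_static] * length
--         for shift, col in anim_definitions:
--             idx = frame_index + shift
--             if idx < 0:
--                 idx = length - idx
--             elif idx >= length:
--                 idx -= length
--             if frame[idx] == col_static:
--                 frame[idx] = col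
--         frames.append(frame)
--     anim_definitions.pop(0)
--     return frames
-- ===== Notes on version B (the rewrite author's own statement) =====
-- stated objective: faster
-- what changed: Instead of building one full 32x32 animation per definition and merging them with a 3-level overlay loop over a mutable base animation, B builds each of the 32 frames directly in one pass over the definitions, writing a definition's pixel only where the frame is still the static colour (first definition wins).
import Mathlib
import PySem

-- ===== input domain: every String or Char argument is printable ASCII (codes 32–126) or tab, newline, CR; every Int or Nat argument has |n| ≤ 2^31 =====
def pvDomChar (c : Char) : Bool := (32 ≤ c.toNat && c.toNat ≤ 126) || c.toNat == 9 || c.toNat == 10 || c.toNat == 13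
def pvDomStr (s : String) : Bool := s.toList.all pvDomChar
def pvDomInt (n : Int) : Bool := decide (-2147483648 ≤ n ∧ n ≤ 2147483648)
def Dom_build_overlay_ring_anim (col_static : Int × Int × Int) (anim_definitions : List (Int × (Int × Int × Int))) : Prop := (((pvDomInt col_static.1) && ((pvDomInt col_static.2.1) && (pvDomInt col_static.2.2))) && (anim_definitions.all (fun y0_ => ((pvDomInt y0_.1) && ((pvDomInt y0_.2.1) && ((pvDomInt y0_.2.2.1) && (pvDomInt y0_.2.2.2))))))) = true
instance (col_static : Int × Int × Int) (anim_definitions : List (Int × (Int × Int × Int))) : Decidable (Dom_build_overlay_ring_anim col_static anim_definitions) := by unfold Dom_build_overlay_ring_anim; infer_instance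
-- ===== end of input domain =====

-- B builds each of the 32 frames directly in one pass over the definitions (first definition
-- wins) instead of building one 32-frame animation per definition and merging them with a
-- triple overlay loop.  Python A pops anim_definitions[0] (an in-place mutation of the caller's
-- list); Python B performs the same pop; the equivalence proved here is about the return value.

-- ===== PORT A =====
-- set_pixel: Python raises IndexError when the adjusted index is still out of range
-- (shift < 0 or shift > 32); Pre_ excludes those inputs, there List.set is a no-op.
def pvSetPixel (frame : List (Int × Int × Int)) (index : Int) (col : Int × Int × Int) : List (Int × Int × Int) :=
  let index := if index < 0 then (frame.length : Int) - index
    else if (frame.length : Int) ≤ index then index - (frame.length : Int) else index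
  frame.set index.toNat col

-- build_ring_anim: start = 88, end = 120, length = end - start = 32
def pvBuildRingAnim (col_static col_moving_spot : Int × Int × Int) (shift : Int) : List (List (Int × Int × Int)) :=
  ((List.range 32).foldl (fun (st : List (Int × Int × Int) × List (List (Int × Int × Int))) (i : Nat) =>
      let i' : Int := (i : Int) + shift
      let f1 := pvSetPixel st.1 i' col_moving_spot
      (pvSetPixel f1 i' col_static, st.2 ++ [f1]))
    (List.replicate 32 col_static, [])).2

-- body of the innermost overlay loop (fi = frame_index, r = (col_index, overlay_col))
def pvOverlayInner (cs : Int × Int × Int) (fi : Nat) (animation : List (List (Int × Int × Int)))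
    (r : Int × (Int × Int × Int)) : List (List (Int × Int × Int)) :=
  let original_col := (animation.getD fi []).getD r.1.toNat (0, 0, 0)
  if original_col = cs then animation.set fi ((animation.getD fi []).set r.1.toNat r.2)
  else animation

-- body of the middle overlay loop (p = (frame_index, overlay_frame))
def pvOverlayFrame (cs : Int × Int × Int) (animation : List (List (Int × Int × Int)))
    (p : Int × List (Int × Int × Int)) : List (List (Int × Int × Int)) :=
  (PySem.List.enumerate p.2 0).foldl (pvOverlayInner cs p.1.toNat) animation

-- body of the outer overlay loop (q = (anim_index, overlay_anim); anim_index is unused)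
def pvOverlayAnim (cs : Int × Int × Int) (animation : List (List (Int × Int × Int)))
    (q : Int × List (List (Int × Int × Int))) : List (List (Int × Int × Int)) :=
  (PySem.List.enumerate q.2 0).foldl (pvOverlayFrame cs) animation

-- anim_definitions.pop(0) mutates the caller's list; only the return value is ported.
def build_overlay_ring_anim (col_static : Int × Int × Int) (anim_definitions : List (Int × (Int × Int × Int))) : List (List (Int × Int × Int)) :=
  let animations := anim_definitions.foldl
    (fun acc d => acc ++ [pvBuildRingAnim col_static d.2 d.1]) []
  let animation := pvBuildRingAnim col_static
    (anim_definitions.getD 0 (0, (0, 0, 0))).2 (anim_definitions.getD 0 (0, (0, 0, 0))).1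
  (PySem.List.enumerate animations 0).foldl (pvOverlayAnim col_static) animation

-- ===== PORT B =====
-- paint one definition onto the frame under construction (first definition wins)
def pvAltStep (cs : Int × Int × Int) (frame_index : Nat) (frame : List (Int × Int × Int))
    (d : Int × (Int × Int × Int)) : List (Int × Int × Int) :=
  let idx : Int := (frame_index : Int) + d.1
  let idx := if idx < 0 then 32 - idx else if 32 ≤ idx then idx - 32 else idx
  if frame.getD idx.toNat (0, 0, 0) = cs then frame.set idx.toNat d.2 else frame

def pvAltFrame (cs : Int × Int × Int) (defs : List (Int × (Int × Int × Int))) (frame_index : Nat) :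
    List (Int × Int × Int) :=
  defs.foldl (pvAltStep cs frame_index) (List.replicate 32 cs)

def build_overlay_ring_anim_alt (col_static : Int × Int × Int) (anim_definitions : List (Int × (Int × Int × Int))) : List (List (Int × Int × Int)) :=
  (List.range 32).foldl
    (fun frames frame_index => frames ++ [pvAltFrame col_static anim_definitions frame_index]) []

-- ===== PRECONDITION & SPEC =====
-- Python A raises IndexError on an empty anim_definitions (anim_definitions[0]) and whenever
-- some shift is outside 0..32 (set_pixel's adjusted index leaves the frame); Pre_ excludes
-- exactly those inputs, on all of which A returns nothing.
def Pre_build_overlay_ring_anim (col_static : Int × Int × Int) (anim_definitions : List (Int × (Int × Int × Int))) : Prop :=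
  anim_definitions ≠ [] ∧ ∀ d ∈ anim_definitions, 0 ≤ d.1 ∧ d.1 ≤ 32
instance (col_static : Int × Int × Int) (anim_definitions : List (Int × (Int × Int × Int))) : Decidable (Pre_build_overlay_ring_anim col_static anim_definitions) := by unfold Pre_build_overlay_ring_anim; infer_instance
def pvWitness_build_overlay_ring_anim : (Int × Int × Int) × (List (Int × (Int × Int × Int))) :=
  ((0, 0, 0), [(0, (255, 255, 0)), (5, (0, 0, 255))])

def Spec_build_overlay_ring_anim (col_static : Int × Int × Int) (anim_definitions : List (Int × (Int × Int × Int))) (out : List (List (Int × Int × Int))) : Prop := out = build_overlay_ring_anim_alt col_static anim_definitions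
instance (col_static : Int × Int × Int) (anim_definitions : List (Int × (Int × Int × Int))) (out : List (List (Int × Int × Int))) : Decidable (Spec_build_overlay_ring_anim col_static anim_definitions out) := by unfold Spec_build_overlay_ring_anim; infer_instance

-- ===== CLAIM (what is proved, stated in full; the proofs are below) =====
def Claim_equal_build_overlay_ring_anim : Prop := ∀ (col_static : Int × Int × Int) (anim_definitions : List (Int × (Int × Int × Int))), Dom_build_overlay_ring_anim col_static anim_definitions → Pre_build_overlay_ring_anim col_static anim_definitions → Spec_build_overlay_ring_anim col_static anim_definitions (build_overlay_ring_anim col_static anim_definitions)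

-- ===== LEMMAS AND PROOFS =====

-- the effective pixel index: (f + s) reduced into 0..31 (for 0 ≤ s ≤ 32, f < 32)
def pvIdx (f : Nat) (s : Int) : Nat := ((f : Int) + s).toNat % 32

-- the frame-local form of the innermost overlay loop body
def pvFrStep (cs : Int × Int × Int) (fr : List (Int × Int × Int)) (r : Int × (Int × Int × Int)) :
    List (Int × Int × Int) :=
  if fr.getD r.1.toNat (0, 0, 0) = cs then fr.set r.1.toNat r.2 else fr

theorem pvIdx_lt (f : Nat) (s : Int) : pvIdx f s < 32 := by
  unfold pvIdx; omega

theorem pvSetPixel_eq (fr : List (Int × Int × Int)) (f : Nat) (s : Int) (c : Int × Int × Int)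
    (hl : fr.length = 32) (hf : f < 32) (hs0 : 0 ≤ s) (hs1 : s ≤ 32) :
    pvSetPixel fr ((f : Int) + s) c = fr.set (pvIdx f s) c := by
  simp only [pvSetPixel, hl]
  split_ifs with h1 h2
  · exfalso; omega
  · congr 1; unfold pvIdx; omega
  · congr 1; unfold pvIdx; omega

theorem pvAltStep_eq (cs : Int × Int × Int) (f : Nat) (fr : List (Int × Int × Int))
    (d : Int × (Int × Int × Int)) (hf : f < 32) (hs0 : 0 ≤ d.1) (hs1 : d.1 ≤ 32) :
    pvAltStep cs f fr d =
      if fr.getD (pvIdx f d.1) (0, 0, 0) = cs then fr.set (pvIdx f d.1) d.2 else fr := by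
  simp only [pvAltStep]
  have he : (if ((f : Int) + d.1) < 0 then (32 : Int) - ((f : Int) + d.1)
      else if (32 : Int) ≤ (f : Int) + d.1 then (f : Int) + d.1 - 32 else (f : Int) + d.1).toNat
      = pvIdx f d.1 := by unfold pvIdx; split_ifs <;> omega
  rw [he]

-- ring-anim characterisation: frame f of build_ring_anim is the static frame with one spot
theorem ring_char (cs c : Int × Int × Int) (s : Int) (hs0 : 0 ≤ s) (hs1 : s ≤ 32) :
    pvBuildRingAnim cs c s =
      (List.range 32).map (fun f => (List.replicate 32 cs).set (pvIdx f s) c) := by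
  have aux : ∀ (l : List Nat), (∀ i ∈ l, i < 32) →
      ∀ (acc : List (List (Int × Int × Int))),
      l.foldl (fun (st : List (Int × Int × Int) × List (List (Int × Int × Int))) (i : Nat) =>
          let i' : Int := (i : Int) + s
          let f1 := pvSetPixel st.1 i' c
          (pvSetPixel f1 i' cs, st.2 ++ [f1]))
        (List.replicate 32 cs, acc)
      = (List.replicate 32 cs, acc ++ l.map (fun f => (List.replicate 32 cs).set (pvIdx f s) c)) := by
    intro l
    induction l with
    | nil => intro _ acc; simp
    | cons i l ih =>
      intro hmem acc
      have hi : i < 32 := hmem i List.mem_cons_self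
      rw [List.foldl_cons]
      simp only
      rw [pvSetPixel_eq _ i s c (List.length_replicate) hi hs0 hs1]
      rw [pvSetPixel_eq _ i s cs (by simp) hi hs0 hs1]
      rw [List.set_set, List.set_replicate_self]
      rw [ih (fun j hj => hmem j (List.mem_cons_of_mem i hj)) (acc ++ [(List.replicate 32 cs).set (pvIdx i s) c])]
      simp
  unfold pvBuildRingAnim
  rw [aux (List.range 32) (fun i hi => List.mem_range.mp hi) []]
  simp

-- generic: a foldl over `enumerate L k` that rewrites slot i to h(slot i, item) is a zipWith
theorem foldl_enum_set {β γ : Type} (h : γ → β → γ) (d : γ) :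
    ∀ (L : List β) (xs : List γ) (k : Nat), xs.length = k + L.length →
      (PySem.List.enumerate L (k : Int)).foldl
          (fun ys (p : Int × β) => ys.set p.1.toNat (h (ys.getD p.1.toNat d) p.2)) xs
        = xs.take k ++ List.zipWith h (xs.drop k) L := by
  intro L
  induction L with
  | nil =>
    intro xs k hk
    simp only [PySem.List.enumerate_nil, List.foldl_nil, List.zipWith_nil_right,
      List.append_nil]
    rw [List.take_of_length_le (by simp at hk; omega)]
  | cons b L ih =>
    intro xs k hk
    simp only [List.length_cons] at hk
    have hk' : k < xs.length := by omega
    rw [PySem.List.enumerate_cons, List.foldl_cons]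
    have hcast : (k : Int) + 1 = ((k + 1 : Nat) : Int) := by push_cast; ring
    rw [hcast]
    simp only [Int.toNat_natCast]
    rw [ih (xs.set k (h (xs.getD k d) b)) (k + 1) (by rw [List.length_set]; omega)]
    rw [List.getD_eq_getElem xs d hk']
    rw [List.take_set, List.drop_set]
    rw [if_pos (by omega : k < k + 1)]
    rw [List.drop_eq_getElem_cons hk']
    simp only [List.zipWith_cons_cons]
    rw [List.take_add_one, List.getElem?_eq_getElem hk']
    simp only [Option.toList_some]
    have hset : (xs.take k ++ [xs[k]]).set k (h xs[k] b) = xs.take k ++ [h xs[k] b] := by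
      rw [List.set_append_right _ _ (by simp)]
      congr 1
      simp [List.length_take, Nat.min_eq_left (by omega : k ≤ xs.length)]
    rw [hset]
    simp

theorem frStep_set_form (cs : Int × Int × Int) (fr : List (Int × Int × Int))
    (r : Int × (Int × Int × Int)) :
    pvFrStep cs fr r
      = fr.set r.1.toNat
          (if fr.getD r.1.toNat (0, 0, 0) = cs then r.2 else fr.getD r.1.toNat (0, 0, 0)) := by
  simp only [pvFrStep]
  by_cases hm : r.1.toNat < fr.length
  · split_ifs with h
    · rfl
    · rw [List.getD_eq_getElem fr _ hm, List.set_getElem_self]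
  · rw [List.set_eq_of_length_le (by omega), List.set_eq_of_length_le (by omega)]
    split_ifs <;> rfl

-- the innermost overlay loop only touches slot fi: it is pvFrStep on that slot
theorem inner_factor (cs : Int × Int × Int) (n : Nat) :
    ∀ (L : List (Int × (Int × Int × Int))) (an : List (List (Int × Int × Int))),
      L.foldl (pvOverlayInner cs n) an = an.set n (L.foldl (pvFrStep cs) (an.getD n [])) := by
  intro L
  induction L with
  | nil =>
    intro an
    simp only [List.foldl_nil]
    by_cases hn : n < an.length
    · rw [List.getD_eq_getElem an [] hn, List.set_getElem_self]
    · rw [List.set_eq_of_length_le (by omega)]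
  | cons r L ih =>
    intro an
    rw [List.foldl_cons, List.foldl_cons, ih]
    have h1 : (pvOverlayInner cs n an r).getD n [] = pvFrStep cs (an.getD n []) r := by
      by_cases hn : n < an.length
      · simp only [pvOverlayInner, pvFrStep]
        split_ifs with h
        · rw [List.getD_eq_getElem _ [] (by simp [hn]), List.getElem_set, if_pos rfl]
        · rfl
      · rw [List.getD_eq_default an [] (by omega)]
        simp only [pvOverlayInner, pvFrStep]
        rw [List.getD_eq_default an [] (by omega)]
        split_ifs with h
        · rw [List.set_eq_of_length_le (by omega), List.getD_eq_default an [] (by omega)]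
          simp
        · rw [List.getD_eq_default an [] (by omega)]
    have h2 : ∀ X, (pvOverlayInner cs n an r).set n X = an.set n X := by
      intro X
      simp only [pvOverlayInner]
      split_ifs with h
      · rw [List.set_set]
      · rfl
    rw [h1, h2]

theorem zipWith_map_same {α β : Type} (h : β → β → β) (g r : α → β) (l : List α) :
    List.zipWith h (l.map g) (l.map r) = l.map (fun x => h (g x) (r x)) := by
  induction l with
  | nil => simp
  | cons x l ih => simp [ih]

-- overlaying a frame with a one-spot ring frame is a single conditional write
theorem frame_overlay (cs c : Int × Int × Int) (n : Nat) (fr : List (Int × Int × Int))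
    (hl : fr.length = 32) (hn : n < 32) :
    (PySem.List.enumerate ((List.replicate 32 cs).set n c) 0).foldl (pvFrStep cs) fr
      = if fr.getD n (0, 0, 0) = cs then fr.set n c else fr := by
  rw [PySem.List.foldl_congr_mem _ (pvFrStep cs)
      (fun ys (p : Int × (Int × Int × Int)) => ys.set p.1.toNat
        ((fun a b => if a = cs then b else a) (ys.getD p.1.toNat (0, 0, 0)) p.2)) fr
      (fun acc x _ => frStep_set_form cs acc x)]
  have hz := foldl_enum_set (fun a b => if a = cs then b else a) ((0, 0, 0) : Int × Int × Int)
    ((List.replicate 32 cs).set n c) fr 0 (by simp [hl])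
  simp only [Nat.cast_zero] at hz
  rw [hz]
  simp only [List.take_zero, List.drop_zero, List.nil_append]
  apply List.ext_getElem
  · simp only [List.length_zipWith, List.length_set, List.length_replicate, hl]
    split_ifs <;> simp [hl]
  · intro i h1 h2
    rw [List.getElem_zipWith]
    have hfr : fr.getD n (0, 0, 0) = fr[n]'(by omega) := List.getD_eq_getElem fr _ (by omega)
    by_cases hP : fr.getD n (0, 0, 0) = cs
    · simp only [if_pos hP]
      have h : fr[n]'(by omega) = cs := by rw [← hfr]; exact hP
      by_cases hi : n = i
      · subst hi
        simp [h]
      · simp only [List.getElem_set, if_neg hi, List.getElem_replicate]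
        split_ifs with hc
        · exact hc.symm
        · rfl
    · simp only [if_neg hP]
      have h : ¬ fr[n]'(by omega) = cs := by rw [← hfr]; exact hP
      by_cases hi : n = i
      · subst hi
        simp only [List.getElem_set]
        exact if_neg h
      · simp only [List.getElem_set, if_neg hi, List.getElem_replicate]
        split_ifs with hc
        · exact hc.symm
        · rfl

-- one outer overlay step on a 32×32 state, expressed per frame
theorem ov_step (cs : Int × Int × Int) (g : Nat → List (Int × Int × Int))
    (hg : ∀ f, f < 32 → (g f).length = 32) (d : Int × (Int × Int × Int))
    (hs0 : 0 ≤ d.1) (hs1 : d.1 ≤ 32) :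
    (PySem.List.enumerate (pvBuildRingAnim cs d.2 d.1) 0).foldl (pvOverlayFrame cs)
        ((List.range 32).map g)
      = (List.range 32).map (fun f => pvAltStep cs f (g f) d) := by
  rw [PySem.List.foldl_congr_mem _ (pvOverlayFrame cs)
      (fun an (p : Int × List (Int × Int × Int)) => an.set p.1.toNat
        ((fun fr ovf => (PySem.List.enumerate ovf 0).foldl (pvFrStep cs) fr)
          (an.getD p.1.toNat []) p.2)) _
      (fun acc x _ => inner_factor cs x.1.toNat (PySem.List.enumerate x.2 0) acc)]
  have hz := foldl_enum_set
    (fun fr ovf => (PySem.List.enumerate ovf 0).foldl (pvFrStep cs) fr) ([] : List (Int × Int × Int))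
    (pvBuildRingAnim cs d.2 d.1) ((List.range 32).map g) 0
    (by rw [ring_char cs d.2 d.1 hs0 hs1]; simp)
  simp only [Nat.cast_zero] at hz
  rw [hz]
  simp only [List.take_zero, List.drop_zero, List.nil_append]
  rw [ring_char cs d.2 d.1 hs0 hs1]
  rw [zipWith_map_same]
  apply List.map_congr_left
  intro f hf
  have hf32 : f < 32 := List.mem_range.mp hf
  rw [frame_overlay cs d.2 (pvIdx f d.1) (g f) (hg f hf32) (pvIdx_lt f d.1)]
  rw [pvAltStep_eq cs f (g f) d hf32 hs0 hs1]

theorem altStep_length (cs : Int × Int × Int) (f : Nat) (fr : List (Int × Int × Int))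
    (d : Int × (Int × Int × Int)) : (pvAltStep cs f fr d).length = fr.length := by
  simp only [pvAltStep]; split_ifs <;> simp

theorem altStep_idem (cs : Int × Int × Int) (f : Nat) (fr : List (Int × Int × Int))
    (d : Int × (Int × Int × Int)) (hl : fr.length = 32) (hf : f < 32)
    (hs0 : 0 ≤ d.1) (hs1 : d.1 ≤ 32) :
    pvAltStep cs f (pvAltStep cs f fr d) d = pvAltStep cs f fr d := by
  have hl' : (pvAltStep cs f fr d).length = 32 := by rw [altStep_length, hl]
  rw [pvAltStep_eq cs f fr d hf hs0 hs1, pvAltStep_eq cs f _ d hf hs0 hs1]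
  by_cases h1 : fr.getD (pvIdx f d.1) (0, 0, 0) = cs
  · rw [if_pos h1]
    split_ifs with h2
    · rw [List.set_set]
    · rfl
  · rw [if_neg h1, if_neg h1]

theorem main_fold (cs : Int × Int × Int) :
    ∀ (ds : List (Int × (Int × Int × Int))), (∀ d ∈ ds, 0 ≤ d.1 ∧ d.1 ≤ 32) →
      ∀ (g : Nat → List (Int × Int × Int)), (∀ f, f < 32 → (g f).length = 32) →
      ds.foldl (fun an d => pvOverlayAnim cs an (0, pvBuildRingAnim cs d.2 d.1))
          ((List.range 32).map g)
        = (List.range 32).map (fun f => ds.foldl (pvAltStep cs f) (g f)) := by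
  intro ds
  induction ds with
  | nil => intro _ g _; simp
  | cons d ds ih =>
    intro hb g hg
    have hd : 0 ≤ d.1 ∧ d.1 ≤ 32 := hb d List.mem_cons_self
    rw [List.foldl_cons]
    have hstep : pvOverlayAnim cs ((List.range 32).map g) (0, pvBuildRingAnim cs d.2 d.1)
        = (List.range 32).map (fun f => pvAltStep cs f (g f) d) := by
      simp only [pvOverlayAnim]
      exact ov_step cs g hg d hd.1 hd.2
    rw [hstep]
    rw [ih (fun x hx => hb x (List.mem_cons_of_mem d hx))
        (fun f => pvAltStep cs f (g f) d)
        (fun f hf => by rw [altStep_length]; exact hg f hf)]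
    simp only [List.foldl_cons]

theorem final_eq (cs : Int × Int × Int) (defs : List (Int × (Int × Int × Int)))
    (hne : defs ≠ []) (hb : ∀ d ∈ defs, 0 ≤ d.1 ∧ d.1 ≤ 32) :
    build_overlay_ring_anim cs defs = build_overlay_ring_anim_alt cs defs := by
  obtain ⟨d0, rest, rfl⟩ := List.exists_cons_of_ne_nil hne
  have hd0 : 0 ≤ d0.1 ∧ d0.1 ≤ 32 := hb d0 List.mem_cons_self
  simp only [build_overlay_ring_anim, build_overlay_ring_anim_alt]
  rw [PySem.List.foldl_append_singleton_eq_map (fun d => pvBuildRingAnim cs d.2 d.1) (d0 :: rest) []]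
  rw [List.nil_append]
  -- the outer overlay loop's index is unused: replace each enumerate pair by (0, its animation)
  rw [PySem.List.foldl_congr_mem _ (pvOverlayAnim cs)
      (fun an (q : Int × List (List (Int × Int × Int))) => pvOverlayAnim cs an (0, q.2)) _
      (fun acc x _ => rfl)]
  rw [← @List.foldl_map _ _ _ (fun (q : Int × List (List (Int × Int × Int))) => q.2)
      (fun an ov => pvOverlayAnim cs an (0, ov)) _ _]
  rw [PySem.List.map_snd_enumerate]
  rw [List.foldl_map]
  -- the base animation is the ring animation of the first definition
  have hget : ((d0 :: rest).getD 0 (0, (0, 0, 0))) = d0 := rfl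
  rw [hget]
  have hbase : pvBuildRingAnim cs d0.2 d0.1
      = (List.range 32).map (fun f => pvAltStep cs f (List.replicate 32 cs) d0) := by
    rw [ring_char cs d0.2 d0.1 hd0.1 hd0.2]
    apply List.map_congr_left
    intro f hf
    have hf32 : f < 32 := List.mem_range.mp hf
    rw [pvAltStep_eq cs f _ d0 hf32 hd0.1 hd0.2]
    rw [if_pos (by
      rw [List.getD_eq_getElem _ _ (by simp [pvIdx_lt f d0.1])]
      exact List.getElem_replicate ..)]
  rw [hbase, List.foldl_cons]
  have hg0 : ∀ f, f < 32 → (pvAltStep cs f (List.replicate 32 cs) d0).length = 32 := by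
    intro f _; rw [altStep_length]; simp
  have hstep1 : pvOverlayAnim cs
        ((List.range 32).map (fun f => pvAltStep cs f (List.replicate 32 cs) d0))
        (0, pvBuildRingAnim cs d0.2 d0.1)
      = (List.range 32).map (fun f => pvAltStep cs f (List.replicate 32 cs) d0) := by
    simp only [pvOverlayAnim]
    rw [ov_step cs _ hg0 d0 hd0.1 hd0.2]
    apply List.map_congr_left
    intro f hf
    exact altStep_idem cs f _ d0 (by simp) (List.mem_range.mp hf) hd0.1 hd0.2
  rw [hstep1]
  rw [main_fold cs rest (fun x hx => hb x (List.mem_cons_of_mem d0 hx)) _ hg0]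
  rw [PySem.List.foldl_append_singleton_eq_map (pvAltFrame cs (d0 :: rest)) (List.range 32) []]
  rw [List.nil_append]
  apply List.map_congr_left
  intro f _
  simp only [pvAltFrame, List.foldl_cons]

-- ===== VERDICT (by name: the statement is the Claim_ definition above) =====
theorem build_overlay_ring_anim_spec : Claim_equal_build_overlay_ring_anim := by
  intro cs defs _ hpre
  exact final_eq cs defs hpre.1 hpre.2
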